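-- pv_equiv track=rewrite | github.com/rustyxlol/TBBoSPP | birthday-paradox/birthday_paradox.py | get_duplicate_birthdays
-- ===== SOURCE A (Python) =====
-- def get_duplicate_birthdays(birthdays):
--     "Returns the recurring birthdays"
--     seen = set()
--     overlaps = []
--     for birthday in birthdays:
--         if birthday in seen:
--             overlaps.append(birthday)
--         else:
--             seen.add(birthday)
--
--     return overlaps
-- ===== SOURCE B (Python) =====
-- def get_duplicate_birthdays(birthdays):
--     "Returns the recurring birthdays"
--     overlaps = list(birthdays)
--     for value in dict.fromkeys(birthdays):
--         overlaps.remove(value)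
--     return overlaps
-- ===== Notes on version B (the rewrite author's own statement) =====
-- stated objective: alternative
-- what changed: Instead of a single stateful scan with a seen-set, B copies the list and deletes the first occurrence of each distinct value (dict.fromkeys then list.remove), leaving exactly the recurring occurrences in position order.
import Mathlib
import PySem

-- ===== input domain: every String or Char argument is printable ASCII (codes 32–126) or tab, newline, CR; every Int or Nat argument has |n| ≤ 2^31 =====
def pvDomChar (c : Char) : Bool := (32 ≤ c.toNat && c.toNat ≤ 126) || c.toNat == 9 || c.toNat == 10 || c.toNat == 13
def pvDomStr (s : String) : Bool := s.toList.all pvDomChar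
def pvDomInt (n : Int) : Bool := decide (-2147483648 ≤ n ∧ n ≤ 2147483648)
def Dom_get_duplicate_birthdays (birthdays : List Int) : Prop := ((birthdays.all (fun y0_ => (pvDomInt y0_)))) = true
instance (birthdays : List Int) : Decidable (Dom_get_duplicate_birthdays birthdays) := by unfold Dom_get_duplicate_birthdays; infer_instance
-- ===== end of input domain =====

-- B replaces A's stateful seen-set scan by deletion: copy the list and remove the first
-- occurrence of each distinct value (alternative decomposition, not claimed faster).

-- ===== PORT A =====
-- literal port of A: one pass with a seen set and an overlaps accumulator
def get_duplicate_birthdays (birthdays : List Int) : List Int :=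
  (birthdays.foldl
    (fun (st : PySem.Set Int × List Int) b =>
      if PySem.Set.contains st.1 b then (st.1, st.2 ++ [b])
      else (PySem.Set.add st.1 b, st.2))
    (PySem.Set.empty, [])).2

-- ===== PORT B =====
-- literal port of B: overlaps = copy of the list; for each distinct value (dict.fromkeys
-- order = PySem.List.dedup) remove its first occurrence.  remove? is none only when the
-- value is absent, which never happens here (each distinct value is removed exactly once),
-- so the .getD fallback is unreachable.
def get_duplicate_birthdays_alt (birthdays : List Int) : List Int :=
  (PySem.List.dedup birthdays).foldl
    (fun overlaps value => (PySem.List.remove? overlaps value).getD overlaps)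
    birthdays

-- ===== PRECONDITION & SPEC =====
def Spec_get_duplicate_birthdays (birthdays : List Int) (out : List Int) : Prop := out = get_duplicate_birthdays_alt birthdays
instance (birthdays : List Int) (out : List Int) : Decidable (Spec_get_duplicate_birthdays birthdays out) := by unfold Spec_get_duplicate_birthdays; infer_instance

-- ===== CLAIM =====
def Claim_equal_get_duplicate_birthdays : Prop := ∀ (birthdays : List Int), Dom_get_duplicate_birthdays birthdays → Spec_get_duplicate_birthdays birthdays (get_duplicate_birthdays birthdays)

-- ===== LEMMAS AND PROOFS =====

-- the common characterisation: keep an element iff it already occurs in `pre` (elements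
-- processed so far); first occurrences extend `pre` and are dropped
def pfFrom (pre l : List Int) : List Int :=
  match l with
  | [] => []
  | b :: rs => if pre.contains b then b :: pfFrom pre rs else pfFrom (pre ++ [b]) rs

-- distinct values of l not occurring in pre, in first-occurrence order
def dv (pre l : List Int) : List Int :=
  match l with
  | [] => []
  | b :: rs => if pre.contains b then dv pre rs else b :: dv (pre ++ [b]) rs

theorem pfFrom_cons (pre : List Int) (b : Int) (rs : List Int) :
    pfFrom pre (b :: rs) = if pre.contains b then b :: pfFrom pre rs else pfFrom (pre ++ [b]) rs := rfl

theorem dv_cons (pre : List Int) (b : Int) (rs : List Int) :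
    dv pre (b :: rs) = if pre.contains b then dv pre rs else b :: dv (pre ++ [b]) rs := rfl

theorem foldl_add_eq_dv (l : List Int) : ∀ (s : List Int),
    List.foldl PySem.Set.add s l = s ++ dv s l := by
  induction l with
  | nil => intro s; simp [dv]
  | cons b rs ih =>
    intro s
    simp only [List.foldl_cons]
    rw [dv_cons]
    by_cases h : s.contains b
    · have hadd : PySem.Set.add s b = s := by
        simp only [PySem.Set.add, PySem.Set.contains]; rw [if_pos h]
      rw [if_pos h, hadd, ih s]
    · have hadd : PySem.Set.add s b = s ++ [b] := by
        simp only [PySem.Set.add, PySem.Set.contains]; rw [if_neg h]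
      rw [if_neg h, hadd, ih (s ++ [b])]
      simp

theorem mem_dv_not_pre {v : Int} : ∀ (l pre : List Int), v ∈ dv pre l → pre.contains v = false := by
  intro l
  induction l with
  | nil => intro pre h; simp [dv] at h
  | cons b rs ih =>
    intro pre h
    rw [dv_cons] at h
    by_cases hb : pre.contains b
    · rw [if_pos hb] at h; exact ih pre h
    · rw [if_neg hb] at h
      rcases List.mem_cons.mp h with h | h
      · subst h; simpa using hb
      · have := ih (pre ++ [b]) h
        simp only [List.contains_append, Bool.or_eq_false_iff] at this
        exact this.1

theorem rm_getD_cons_ne (b v : Int) (x : List Int) (h : v ≠ b) :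
    (PySem.List.remove? (b :: x) v).getD (b :: x) = b :: (PySem.List.remove? x v).getD x := by
  rw [PySem.List.remove?_cons_of_ne x (Ne.symm h)]
  cases hx : PySem.List.remove? x v <;> simp

theorem foldl_rm_cons (s : List Int) : ∀ (b : Int) (x : List Int), (∀ v ∈ s, v ≠ b) →
    s.foldl (fun overlaps value => (PySem.List.remove? overlaps value).getD overlaps) (b :: x)
      = b :: s.foldl (fun overlaps value => (PySem.List.remove? overlaps value).getD overlaps) x := by
  induction s with
  | nil => intro b x _; simp
  | cons v vs ih =>
    intro b x h
    simp only [List.foldl_cons]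
    rw [rm_getD_cons_ne b v x (h v (by simp))]
    exact ih b _ (fun w hw => h w (by simp [hw]))

theorem foldl_rm_dv (l : List Int) : ∀ (pre : List Int),
    (dv pre l).foldl (fun overlaps value => (PySem.List.remove? overlaps value).getD overlaps) l
      = pfFrom pre l := by
  induction l with
  | nil => intro pre; simp [dv, pfFrom]
  | cons b rs ih =>
    intro pre
    by_cases hb : pre.contains b
    · have hne : ∀ v ∈ dv pre rs, v ≠ b := by
        intro v hv he
        subst he
        rw [mem_dv_not_pre rs pre hv] at hb
        exact Bool.false_ne_true hb
      rw [dv_cons, pfFrom_cons, if_pos hb, if_pos hb]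
      rw [foldl_rm_cons (dv pre rs) b rs hne, ih pre]
    · rw [dv_cons, pfFrom_cons, if_neg hb, if_neg hb]
      simp only [List.foldl_cons]
      rw [PySem.List.remove?_cons_self]
      simp only [Option.getD_some]
      exact ih (pre ++ [b])

theorem A_loop (l : List Int) : ∀ (pre acc : List Int) (seen : PySem.Set Int),
    (∀ x : Int, PySem.Set.contains seen x = pre.contains x) →
    (l.foldl
      (fun (st : PySem.Set Int × List Int) b =>
        if PySem.Set.contains st.1 b then (st.1, st.2 ++ [b])
        else (PySem.Set.add st.1 b, st.2))
      (seen, acc)).2 = acc ++ pfFrom pre l := by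
  induction l with
  | nil => intro pre acc seen _; simp [pfFrom]
  | cons b rs ih =>
    intro pre acc seen h
    simp only [List.foldl_cons]
    by_cases hb : pre.contains b
    · rw [if_pos (by rw [h]; exact hb)]
      rw [ih pre (acc ++ [b]) seen h, pfFrom_cons, if_pos hb]
      simp
    · rw [if_neg (by rw [h]; simpa using hb)]
      have hinv : ∀ x : Int, PySem.Set.contains (PySem.Set.add seen b) x = (pre ++ [b]).contains x := by
        intro x
        have hadd : PySem.Set.add seen b = (seen : List Int) ++ [b] := by
          simp only [PySem.Set.add]
          rw [if_neg (by rw [h]; simpa using hb)]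
        rw [hadd]
        have : PySem.Set.contains ((seen : List Int) ++ [b]) x
            = (PySem.Set.contains (seen : List Int) x || [b].contains x) := by
          simp [PySem.Set.contains]

        rw [this, h, List.contains_append]
      rw [ih (pre ++ [b]) acc (PySem.Set.add seen b) hinv, pfFrom_cons, if_neg hb]

-- ===== VERDICT =====
theorem get_duplicate_birthdays_spec : Claim_equal_get_duplicate_birthdays := by
  intro birthdays _
  unfold Spec_get_duplicate_birthdays get_duplicate_birthdays get_duplicate_birthdays_alt
  rw [A_loop birthdays [] [] PySem.Set.empty (by intro x; simp [PySem.Set.empty, PySem.Set.contains])]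
  rw [PySem.List.dedup_eq_ofList, PySem.Set.ofList_eq_foldl]
  have := foldl_add_eq_dv birthdays []
  simp only [List.nil_append] at this
  rw [this, foldl_rm_dv birthdays []]
  simp
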